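-- pv_equiv track=rewrite | github.com/borovikv/ds-lab | projects/kaggle-airbnb/src/2_features.py | count_times_a_before_b
-- ===== SOURCE A (Python) =====
-- def count_times_a_before_b(a, b, lst):
--     pos_a = lst.index(a) if a in lst else None
--     pos_b = lst.index(b, pos_a) if b in lst and pos_a is not None else None
--     count = 0
--     while pos_a is not None and pos_b is not None:
--         count += 1
--         pos_a = lst.index(a, pos_a + 1) if a in lst[pos_a + 1:] else None
--         pos_b = lst.index(b, pos_a) if b in lst[pos_a:] and pos_a is not None else None
--     return count
-- ===== SOURCE B (Python) =====
-- def count_times_a_before_b(a, b, lst):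
--     # One pass from the right: an occurrence of a counts iff some b occurs at or after it.
--     count = 0
--     seen_b = False
--     for x in reversed(lst):
--         if x == b:
--             seen_b = True
--         if x == a and seen_b:
--             count += 1
--     return count
-- ===== Notes on version B (the rewrite author's own statement) =====
-- stated objective: alternative
-- what changed: A repeatedly rescans the list with index()/slices for successive occurrences of a and for a b at or after each; B is a single right-to-left pass with a seen-b flag, counting a's while the flag is set.
import Mathlib
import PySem

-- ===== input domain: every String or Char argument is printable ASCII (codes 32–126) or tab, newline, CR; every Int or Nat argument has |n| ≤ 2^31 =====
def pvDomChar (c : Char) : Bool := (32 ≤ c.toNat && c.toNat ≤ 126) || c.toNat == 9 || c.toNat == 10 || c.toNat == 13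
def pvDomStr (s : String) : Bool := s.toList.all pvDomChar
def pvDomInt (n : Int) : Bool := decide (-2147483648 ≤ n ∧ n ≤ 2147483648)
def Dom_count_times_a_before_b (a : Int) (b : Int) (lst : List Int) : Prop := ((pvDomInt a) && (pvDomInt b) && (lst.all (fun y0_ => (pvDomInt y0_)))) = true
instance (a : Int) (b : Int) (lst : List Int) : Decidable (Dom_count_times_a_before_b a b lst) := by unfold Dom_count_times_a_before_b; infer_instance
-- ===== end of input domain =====

-- B replaces A's repeated index()/slice rescans by one right-to-left pass with a seen-b flag;
-- equivalence is claimed on Pre_, which excludes the inputs where Python A raises ValueError.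

-- ===== PORT A =====
-- Python `lst.index(v, start) if v in lst[start:] else None` for 0 ≤ start:
-- membership in the slice, and index-from-start = start + index inside the slice (exact for start ≥ 0).
def aNext (lst : List Int) (v : Int) (start : Int) : Option Int :=
  match PySem.List.index? (PySem.List.slice lst (some start) none) v with
  | some i => some (start + (i : Int))
  | none => none

-- the while loop; fuel (length+1) only makes the recursion structural, it is never exhausted
def aLoop (a b : Int) (lst : List Int) : Nat → Option Int → Option Int → Int → Int
  | 0, _, _, count => count
  | fuel + 1, pos_a, pos_b, count =>
    match pos_a, pos_b with
    | some pa, some _ =>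
        let count := count + 1
        let pa' := aNext lst a (pa + 1)
        let pb' := match pa' with
                   | some p => aNext lst b p
                   | none => none
        aLoop a b lst fuel pa' pb' count
    | _, _ => count

def count_times_a_before_b (a : Int) (b : Int) (lst : List Int) : Int :=
  let pos_a : Option Int := if a ∈ lst then (PySem.List.index? lst a).map (fun n => (n : Int)) else none
  let pos_b : Option Int :=
    match pos_a with
    | some pa => if b ∈ lst then aNext lst b pa else none  -- aNext = none exactly where Python A raises; Pre_ excludes those inputs
    | none => none
  aLoop a b lst (lst.length + 1) pos_a pos_b 0

-- ===== PORT B =====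
def count_times_a_before_b_alt (a : Int) (b : Int) (lst : List Int) : Int :=
  (lst.reverse.foldl
    (fun (st : Int × Bool) x =>
      let seen := st.2 || decide (x = b)
      (st.1 + (if x = a ∧ seen = true then 1 else 0), seen))
    (0, false)).1

-- ===== PRECONDITION & SPEC =====
-- Pre_ excludes exactly the inputs on which Python A raises ValueError: both a and b occur but every b
-- lies strictly before the first a (A guards its first index(b, pos_a) with 'b in lst', not 'b in lst[pos_a:]').
def Pre_count_times_a_before_b (a : Int) (b : Int) (lst : List Int) : Prop :=
  (a ∈ lst ∧ b ∈ lst) → b ∈ lst.drop (lst.idxOf a)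
instance (a : Int) (b : Int) (lst : List Int) : Decidable (Pre_count_times_a_before_b a b lst) := by unfold Pre_count_times_a_before_b; infer_instance
def pvWitness_count_times_a_before_b : Int × Int × List Int := (1, 2, [1, 2])

def Spec_count_times_a_before_b (a : Int) (b : Int) (lst : List Int) (out : Int) : Prop := out = count_times_a_before_b_alt a b lst
instance (a : Int) (b : Int) (lst : List Int) (out : Int) : Decidable (Spec_count_times_a_before_b a b lst out) := by unfold Spec_count_times_a_before_b; infer_instance

-- ===== CLAIM (what is proved, stated in full; the proofs are below) =====
def Claim_equal_count_times_a_before_b : Prop := ∀ (a : Int) (b : Int) (lst : List Int), Dom_count_times_a_before_b a b lst → Pre_count_times_a_before_b a b lst → Spec_count_times_a_before_b a b lst (count_times_a_before_b a b lst)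


-- ===== LEMMAS AND PROOFS =====

-- the count both programs compute: occurrences of a followed (at or after their position) by a b
def specC (a b : Int) : List Int → Int
  | [] => 0
  | x :: t => (if x = a ∧ b ∈ x :: t then 1 else 0) + specC a b t

lemma specC_of_b_not_mem (a b : Int) (t : List Int) (h : b ∉ t) : specC a b t = 0 := by
  induction t with
  | nil => rfl
  | cons x t ih =>
      have hx : b ∉ t := fun hm => h (List.mem_cons_of_mem _ hm)
      have hc : ¬(x = a ∧ b ∈ x :: t) := fun hc => h hc.2
      unfold specC
      rw [ih hx, if_neg hc]; ring

lemma specC_of_not_mem (a b : Int) (t : List Int) (h : a ∉ t) : specC a b t = 0 := by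
  induction t with
  | nil => rfl
  | cons x t ih =>
      have hx : x ≠ a := fun he => h (he ▸ List.mem_cons_self)
      have ht : a ∉ t := fun hm => h (List.mem_cons_of_mem _ hm)
      simp [specC, ih ht, hx]

lemma specC_idx (a b : Int) : ∀ (t : List Int) (k : Nat), List.idxOf? a t = some k →
    specC a b t = (if b ∈ t.drop k then 1 else 0) + specC a b (t.drop (k + 1)) := by
  intro t
  induction t with
  | nil => intro k h; simp [List.idxOf?] at h
  | cons x t ih =>
      intro k h
      rw [List.idxOf?_cons] at h
      by_cases hx : x = a
      · subst hx
        simp only [BEq.rfl, if_pos] at h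
        obtain rfl : (0 : Nat) = k := by simpa using h
        simp [specC]
      · simp only [beq_iff_eq, hx, if_false] at h
        cases hj : List.idxOf? a t with
        | none => rw [hj] at h; simp at h
        | some j =>
            rw [hj] at h
            simp only [Option.map_some, Option.some.injEq] at h
            subst h
            simp only [List.drop_succ_cons]
            simp [specC, hx, ih j hj]

-- first index of v at or after s, as the port computes it
lemma aNext_natCast (lst : List Int) (v : Int) (s : Nat) :
    aNext lst v (s : Int) = (List.idxOf? v (lst.drop s)).map (fun k => ((s + k : Nat) : Int)) := by
  unfold aNext
  rw [PySem.List.slice_from_natCast, PySem.List.index?_eq_idxOf?]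
  cases h : List.idxOf? v (lst.drop s) with
  | none => simp
  | some k => simp

lemma aLoop_eq (a b : Int) (lst : List Int) :
    ∀ (fuel s : Nat) (count : Int), lst.length + 1 ≤ fuel + s →
    aLoop a b lst fuel (aNext lst a (s : Int))
      (match aNext lst a (s : Int) with
       | some p => aNext lst b p
       | none => none) count
      = count + specC a b (lst.drop s) := by
  intro fuel
  induction fuel with
  | zero =>
      intro s count hs
      have hnil : lst.drop s = [] := List.drop_eq_nil_of_le (by omega)
      rw [aNext_natCast]
      have h0 : List.idxOf? a (lst.drop s) = none := by rw [hnil]; rfl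
      simp [aLoop, hnil, specC]
  | succ fuel ih =>
      intro s count hs
      rw [aNext_natCast]
      cases hA : List.idxOf? a (lst.drop s) with
      | none =>
          have hmem : a ∉ lst.drop s := by
            simpa using List.idxOf?_eq_none_iff.mp hA
          simp [aLoop, specC_of_not_mem a b _ hmem]
      | some k =>
          have hdd : (lst.drop s).drop k = lst.drop (s + k) := List.drop_drop
          have hdd1 : (lst.drop s).drop (k + 1) = lst.drop (s + k + 1) := by
            rw [List.drop_drop, ← Nat.add_assoc]
          cases hB : aNext lst b ((s + k : Nat) : Int) with
          | none =>
              have hbnot : b ∉ lst.drop (s + k) := by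
                rw [aNext_natCast] at hB
                cases h2 : List.idxOf? b (lst.drop (s + k)) with
                | some j => rw [h2] at hB; simp at hB
                | none => simpa using List.idxOf?_eq_none_iff.mp h2
              have h1 : b ∉ (lst.drop s).drop k := hdd ▸ hbnot
              have h2 : b ∉ (lst.drop s).drop (k + 1) := by
                rw [hdd1]
                intro hm
                apply hbnot
                have he : lst.drop (s + k + 1) = List.drop 1 (lst.drop (s + k)) := by
                  rw [List.drop_drop]
                rw [he] at hm
                exact List.mem_of_mem_drop hm
              have hz : specC a b (lst.drop s) = 0 := by
                rw [specC_idx a b _ k hA, hdd, hdd1, if_neg hbnot,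
                    specC_of_b_not_mem a b _ (hdd1 ▸ h2)]
                ring
              simp only [Option.map_some, aLoop, hB]
              simp [hz]
          | some pb =>
              have hcast : ((s + k : Nat) : Int) + 1 = ((s + k + 1 : Nat) : Int) := by push_cast; ring
              have hrec := ih (s + k + 1) (count + 1) (by omega)
              have hbmem : b ∈ lst.drop (s + k) := by
                rw [aNext_natCast] at hB
                cases h2 : List.idxOf? b (lst.drop (s + k)) with
                | none => rw [h2] at hB; simp at hB
                | some j =>
                    obtain ⟨hlt, hval, -⟩ := List.idxOf?_eq_some_iff.mp h2
                    exact hval ▸ List.getElem_mem hlt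
              have hspec : specC a b (lst.drop s) = 1 + specC a b (lst.drop (s + k + 1)) := by
                rw [specC_idx a b _ k hA, hdd, hdd1, if_pos hbmem]
              simp only [Option.map_some, aLoop, hB, hcast]
              rw [hrec, hspec]
              ring

-- B's fold, read as a foldr, returns (specC, seen-b)
lemma b_foldr (a b : Int) (t : List Int) :
    t.foldr (fun x (st : Int × Bool) =>
        let seen := st.2 || decide (x = b)
        (st.1 + (if x = a ∧ seen = true then 1 else 0), seen)) (0, false)
      = (specC a b t, decide (b ∈ t)) := by
  induction t with
  | nil => simp [specC]
  | cons x t ih =>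
      simp only [List.foldr_cons, ih]
      have hseen : (decide (b ∈ t) || decide (x = b)) = decide (b ∈ x :: t) := by
        by_cases hxb : b = x
        · simp [hxb]
        · simp only [List.mem_cons, hxb, false_or]
          by_cases hbx : x = b
          · exact absurd hbx.symm hxb
          · simp [hbx]
      rw [Prod.mk.injEq]
      refine ⟨?_, hseen⟩
      simp only [hseen, specC]
      by_cases hc : x = a ∧ b ∈ x :: t
      · rw [if_pos hc, if_pos ⟨hc.1, by simp [hc.2]⟩]; ring
      · rw [if_neg hc, if_neg (by simpa using hc)]; ring

lemma alt_eq_specC (a b : Int) (lst : List Int) :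
    count_times_a_before_b_alt a b lst = specC a b lst := by
  unfold count_times_a_before_b_alt
  rw [List.foldl_reverse]
  have := b_foldr a b lst
  simp only [this]

-- the initial pos_a of A's port is aNext at 0
lemma posA_eq (a : Int) (lst : List Int) :
    (if a ∈ lst then (PySem.List.index? lst a).map (fun n => (n : Int)) else none)
      = aNext lst a ((0 : Nat) : Int) := by
  rw [aNext_natCast]
  simp only [List.drop_zero, PySem.List.index?_eq_idxOf?]
  by_cases h : a ∈ lst
  · simp only [if_pos h]
    cases hI : List.idxOf? a lst with
    | none => rfl
    | some k => simp
  · have h0 : List.idxOf? a lst = none := List.idxOf?_eq_none_iff.mpr (by simpa using h)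
    simp [h, h0]

-- ===== VERDICT (by name: the statement is the Claim_ definition above) =====
theorem count_times_a_before_b_spec : Claim_equal_count_times_a_before_b := by
  intro a b lst _ hpre
  unfold Spec_count_times_a_before_b
  rw [alt_eq_specC]
  unfold count_times_a_before_b
  simp only [posA_eq]
  have hloop := aLoop_eq a b lst (lst.length + 1) 0 0 (by omega)
  simp only [List.drop_zero] at hloop
  -- show the port's initial pos_b equals the loop-shape pos_b, then apply hloop
  have hposb :
      (match aNext lst a ((0 : Nat) : Int) with
       | some pa => if b ∈ lst then aNext lst b pa else none
       | none => none)
      = (match aNext lst a ((0 : Nat) : Int) with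
         | some p => aNext lst b p
         | none => none) := by
    cases hA : aNext lst a ((0 : Nat) : Int) with
    | none => rfl
    | some pa =>
        simp only
        by_cases hb : b ∈ lst
        · simp [hb]
        · rw [if_neg hb]
          rw [aNext_natCast] at hA
          cases h2 : lst.idxOf? a with
          | none => rw [List.drop_zero, h2] at hA; simp at hA
          | some k =>
              rw [List.drop_zero, h2] at hA
              simp at hA
              have hnb : b ∉ lst.drop k := fun hm => hb (List.mem_of_mem_drop hm)
              rw [← hA]
              rw [aNext_natCast]
              have h3 : List.idxOf? b (lst.drop k) = none := List.idxOf?_eq_none_iff.mpr (by simpa using hnb)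
              simp [h3]
  rw [hposb, hloop]
  simp
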